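-- pv_equiv track=rewrite | github.com/ptbarros/dollar-bill-processor | pattern_engine_v2.py | _check_step_ladder
-- ===== SOURCE A (Python) =====
-- def _check_step_ladder(digits: str) -> bool:
--     """Steps of 2."""
--     if len(digits) != 8:
--         return False
--     nums = [int(d) for d in digits]
--     for i in range(5):
--         if all(nums[i+j+1] - nums[i+j] == 2 for j in range(3)):
--             return True
--         if all(nums[i+j] - nums[i+j+1] == 2 for j in range(3)):
--             return True
--     return False
-- ===== SOURCE B (Python) =====
-- def _check_step_ladder(digits: str) -> bool:
--     """Steps of 2: single streaming pass keeping run counters, no windows."""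
--     if len(digits) != 8:
--         return False
--     prev = int(digits[0])
--     up = down = 0
--     for ch in digits[1:]:
--         cur = int(ch)
--         d = cur - prev
--         up = up + 1 if d == 2 else 0
--         down = down + 1 if d == -2 else 0
--         if up >= 3 or down >= 3:
--             return True
--         prev = cur
--     return False
-- ===== Notes on version B (the rewrite author's own statement) =====
-- stated objective: alternative
-- what changed: B replaces A's five explicitly-quantified 4-digit windows by a single streaming pass that converts each digit on the fly and maintains two run counters (current ascending-by-2 and descending-by-2 run lengths), returning True as soon as a counter reaches 3.
import Mathlib
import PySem

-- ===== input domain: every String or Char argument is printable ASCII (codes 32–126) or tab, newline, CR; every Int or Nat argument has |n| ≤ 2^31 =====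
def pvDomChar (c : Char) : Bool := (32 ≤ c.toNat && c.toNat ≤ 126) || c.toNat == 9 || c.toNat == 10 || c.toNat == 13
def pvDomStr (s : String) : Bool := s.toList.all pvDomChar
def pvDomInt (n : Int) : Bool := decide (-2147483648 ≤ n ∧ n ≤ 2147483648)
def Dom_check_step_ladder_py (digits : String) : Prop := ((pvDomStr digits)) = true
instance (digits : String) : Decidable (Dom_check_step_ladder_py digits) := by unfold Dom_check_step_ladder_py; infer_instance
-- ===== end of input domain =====

-- B replaces A's five quantified windows by a single streaming pass with two run counters; equal on all of Pre_.

-- ===== PORT A =====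
-- int(d) on a one-char string; Pre_ excludes the ValueError case (none), so getD 0 is never taken under Pre_
def pvIntOfChar (c : Char) : Int := (PySem.Int.ofStr? (String.ofList [c])).getD 0

def check_step_ladder_py (digits : String) : Bool :=
  if digits.toList.length ≠ 8 then false
  else
    let nums := digits.toList.map pvIntOfChar
    (PySem.List.pyRange 0 5 1).any (fun i =>
      ((PySem.List.pyRange 0 3 1).all (fun j =>
          PySem.List.pyGetD nums (i + j + 1) 0 - PySem.List.pyGetD nums (i + j) 0 == 2))
      ||
      ((PySem.List.pyRange 0 3 1).all (fun j =>
          PySem.List.pyGetD nums (i + j) 0 - PySem.List.pyGetD nums (i + j + 1) 0 == 2)))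

-- ===== PORT B =====
-- Source B's for-loop over digits[1:] with run counters; the early `return True` becomes returning true instead of recursing
def pvLadderLoop : List Char → Int → Nat → Nat → Bool
  | [], _, _, _ => false
  | ch :: rest, prev, up, down =>
    let cur := pvIntOfChar ch
    let d := cur - prev
    let up' := if d == 2 then up + 1 else 0
    let down' := if d == -2 then down + 1 else 0
    if up' ≥ 3 || down' ≥ 3 then true
    else pvLadderLoop rest cur up' down'

def check_step_ladder_py_alt (digits : String) : Bool :=
  if digits.toList.length ≠ 8 then false
  else
    match digits.toList with
    | [] => false   -- unreachable: the list has length 8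
    | c0 :: rest => pvLadderLoop rest (pvIntOfChar c0) 0 0

-- ===== PRECONDITION & SPEC =====
-- Pre_ excludes only inputs where A raises ValueError: length-8 strings containing a non-digit char.
def Pre_check_step_ladder_py (digits : String) : Prop :=
  digits.toList.length = 8 → ∀ c ∈ digits.toList, c.isDigit = true
instance (digits : String) : Decidable (Pre_check_step_ladder_py digits) := by
  unfold Pre_check_step_ladder_py; infer_instance

def pvWitness_check_step_ladder_py : String := "1357"

def Spec_check_step_ladder_py (digits : String) (out : Bool) : Prop := out = check_step_ladder_py_alt digits
instance (digits : String) (out : Bool) : Decidable (Spec_check_step_ladder_py digits out) := by unfold Spec_check_step_ladder_py; infer_instance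

-- ===== CLAIM =====
def Claim_equal_check_step_ladder_py : Prop := ∀ (digits : String), Dom_check_step_ladder_py digits → Pre_check_step_ladder_py digits → Spec_check_step_ladder_py digits (check_step_ladder_py digits)

-- ===== LEMMAS AND PROOFS =====

-- both ±2 tests on a difference, rewritten with a canonical orientation (-2 on the right)
theorem atom_norm (a b : Int) : (a - b == (2:Int)) = (b - a == (-2:Int)) := by
  rw [Bool.eq_iff_iff]; simp only [beq_iff_eq]; omega

-- B's loop with the two ±2 tests abstracted to a list of boolean pairs
def pvLoopBools : List (Bool × Bool) → Nat → Nat → Bool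
  | [], _, _ => false
  | (x, y) :: rest, up, down =>
    let up' := if x then up + 1 else 0
    let down' := if y then down + 1 else 0
    if up' ≥ 3 || down' ≥ 3 then true
    else pvLoopBools rest up' down'

def pvAtoms : List Char → Int → List (Bool × Bool)
  | [], _ => []
  | ch :: rest, prev =>
    (pvIntOfChar ch - prev == 2, pvIntOfChar ch - prev == -2) :: pvAtoms rest (pvIntOfChar ch)

theorem loop_to_bools (l : List Char) : ∀ (prev : Int) (up down : Nat),
    pvLadderLoop l prev up down = pvLoopBools (pvAtoms l prev) up down := by
  induction l with
  | nil => intro prev up down; rfl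
  | cons ch rest ih =>
    intro prev up down
    simp only [pvLadderLoop, pvAtoms, pvLoopBools]
    split <;> simp [ih]

theorem list_len8 {α : Type} (l : List α) (h : l.length = 8) :
    ∃ a b c d e f g h', l = [a, b, c, d, e, f, g, h'] := by
  match l, h with
  | [a, b, c, d, e, f, g, h'], _ => exact ⟨a, b, c, d, e, f, g, h', rfl⟩

-- the window disjunction equals the counter loop, for arbitrary boolean atoms
set_option maxHeartbeats 1000000 in
theorem key (u0 u1 u2 u3 u4 u5 u6 y0 y1 y2 y3 y4 y5 y6 : Bool) :
    (u0 && (u1 && u2) || y0 && (y1 && y2) ||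
      (u1 && (u2 && u3) || y1 && (y2 && y3) ||
        (u2 && (u3 && u4) || y2 && (y3 && y4) ||
          (u3 && (u4 && u5) || y3 && (y4 && y5) ||
            (u4 && (u5 && u6) || y4 && (y5 && y6))))))
    = pvLoopBools [(u0,y0),(u1,y1),(u2,y2),(u3,y3),(u4,y4),(u5,y5),(u6,y6)] 0 0 := by
  revert u0 u1 u2 u3 u4 u5 u6 y0 y1 y2 y3 y4 y5 y6
  decide

-- ===== VERDICT =====
set_option maxHeartbeats 1000000 in
theorem check_step_ladder_py_spec : Claim_equal_check_step_ladder_py := by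
  intro digits _ _
  unfold Spec_check_step_ladder_py check_step_ladder_py check_step_ladder_py_alt
  by_cases hlen : digits.toList.length = 8
  · obtain ⟨a, b, c, d, e, f, g, h', hl⟩ := list_len8 _ hlen
    rw [hl]
    rw [show PySem.List.pyRange 0 5 1 = [0,1,2,3,4] from rfl,
        show PySem.List.pyRange 0 3 1 = [0,1,2] from rfl]
    simp only [List.any_cons, List.any_nil, List.all_cons, List.all_nil,
      Bool.or_false, Bool.and_true, List.map_cons, List.map_nil]
    norm_num [PySem.List.pyGetD_ofNat']
    rw [loop_to_bools]
    simp only [pvAtoms]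
    generalize pvIntOfChar a = n0
    generalize pvIntOfChar b = n1
    generalize pvIntOfChar c = n2
    generalize pvIntOfChar d = n3
    generalize pvIntOfChar e = n4
    generalize pvIntOfChar f = n5
    generalize pvIntOfChar g = n6
    generalize pvIntOfChar h' = n7
    simp only [atom_norm]
    exact key (n0-n1 == -2) (n1-n2 == -2) (n2-n3 == -2) (n3-n4 == -2) (n4-n5 == -2) (n5-n6 == -2) (n6-n7 == -2)
              (n1-n0 == -2) (n2-n1 == -2) (n3-n2 == -2) (n4-n3 == -2) (n5-n4 == -2) (n6-n5 == -2) (n7-n6 == -2)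
  · have h2 : digits.length ≠ 8 := by simpa using hlen
    simp [h2]
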